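-- pv_equiv track=rewrite | github.com/local-web-services/local-web-services | src/lws/providers/dynamodb/parser_base.py | scan_number_literal
-- ===== SOURCE A (Python) =====
-- def scan_number_literal(expression: str, start: int) -> int:
--     """Scan a numeric literal and return the end position.
--
--     Handles integers and floats (single decimal point).
--     Caller is responsible for checking that ``expression[start]`` is a digit
--     (or minus followed by a digit).
--     """
--     end = start + 1
--     has_dot = False
--     while end < len(expression) and (expression[end].isdigit() or expression[end] == "."):
--         if expression[end] == ".":
--             if has_dot:
--                 break
--             has_dot = True
--         end += 1
--     return end
-- ===== SOURCE B (Python) =====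
-- def _scan_digits(expression, i):
--     while i < len(expression) and expression[i].isdigit():
--         i += 1
--     return i
--
--
-- def scan_number_literal(expression, start):
--     end = _scan_digits(expression, start + 1)
--     if end < len(expression) and expression[end] == ".":
--         end = _scan_digits(expression, end + 1)
--     return end
-- ===== Notes on version B (the rewrite author's own statement) =====
-- stated objective: simpler
-- what changed: A's single while-loop carrying a has_dot flag is replaced by a grammar-shaped scan: one digit run, then an optional single '.' followed by another digit run, using a shared _scan_digits helper and no flag.
import Mathlib
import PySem

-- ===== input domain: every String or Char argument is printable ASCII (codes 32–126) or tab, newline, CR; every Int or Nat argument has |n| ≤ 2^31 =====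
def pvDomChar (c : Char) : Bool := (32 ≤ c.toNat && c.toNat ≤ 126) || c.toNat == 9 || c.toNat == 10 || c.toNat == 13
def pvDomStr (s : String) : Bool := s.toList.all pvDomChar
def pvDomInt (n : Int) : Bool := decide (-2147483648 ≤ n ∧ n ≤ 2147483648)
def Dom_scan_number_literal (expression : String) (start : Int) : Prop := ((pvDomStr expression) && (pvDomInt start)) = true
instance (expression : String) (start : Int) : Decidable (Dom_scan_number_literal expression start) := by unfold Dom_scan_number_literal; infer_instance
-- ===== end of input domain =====

-- B replaces A's single while-loop with a has_dot flag by a grammar-shaped scan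
-- (digit run, then optional '.', then digit run); objective: simpler, same cost.

-- ===== PORT A =====
-- the while loop of A: state (end_, hasDot); on IndexError (pyGet? = none, excluded by Pre_) returns end_
def pvLoopA (e : List Char) (end_ : Int) (hasDot : Bool) : Int :=
  if _h : end_ < (e.length : Int) then
    match PySem.List.pyGet? e end_ with
    | none => end_
    | some c =>
      if PySem.Chars.isdigit c || c = '.' then
        if c = '.' then
          if hasDot then end_ else pvLoopA e (end_ + 1) true
        else pvLoopA e (end_ + 1) hasDot
      else end_
  else end_
termination_by ((e.length : Int) - end_).toNat
decreasing_by all_goals omega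

def scan_number_literal (expression : String) (start : Int) : Int :=
  pvLoopA expression.toList (start + 1) false

-- ===== PORT B =====
-- _scan_digits of Source B
def pvScanDigits (e : List Char) (i : Int) : Int :=
  if _h : i < (e.length : Int) then
    match PySem.List.pyGet? e i with
    | none => i
    | some c => if PySem.Chars.isdigit c then pvScanDigits e (i + 1) else i
  else i
termination_by ((e.length : Int) - i).toNat
decreasing_by all_goals omega

def scan_number_literal_alt (expression : String) (start : Int) : Int :=
  let e := expression.toList
  let end1 := pvScanDigits e (start + 1)
  if end1 < (e.length : Int) ∧ PySem.List.pyGet? e end1 = some '.' then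
    pvScanDigits e (end1 + 1)
  else end1

-- ===== PRECONDITION & SPEC =====
-- A raises IndexError when the first probed index start+1 is below -len(expression); excluded.
def Pre_scan_number_literal (expression : String) (start : Int) : Prop :=
  -(expression.toList.length : Int) ≤ start + 1
instance (expression : String) (start : Int) : Decidable (Pre_scan_number_literal expression start) := by unfold Pre_scan_number_literal; infer_instance
def pvWitness_scan_number_literal : String × Int := ("12.5+", 0)

def Spec_scan_number_literal (expression : String) (start : Int) (out : Int) : Prop := out = scan_number_literal_alt expression start
instance (expression : String) (start : Int) (out : Int) : Decidable (Spec_scan_number_literal expression start out) := by unfold Spec_scan_number_literal; infer_instance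

-- ===== CLAIM (what is proved, stated in full; the proofs are below) =====
def Claim_equal_scan_number_literal : Prop := ∀ (expression : String) (start : Int), Dom_scan_number_literal expression start → Pre_scan_number_literal expression start → Spec_scan_number_literal expression start (scan_number_literal expression start)

-- ===== LEMMAS AND PROOFS =====

-- once A's flag is set, its loop behaves exactly like a digit scan
theorem pvLoopA_true (e : List Char) (i : Int) :
    pvLoopA e i true = pvScanDigits e i := by
  rw [pvLoopA, pvScanDigits]
  split
  · rcases hg : PySem.List.pyGet? e i with _ | c
    · rfl
    · by_cases hd : PySem.Chars.isdigit c = true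
      · by_cases hc : c = '.'
        · subst hc; simp [PySem.Chars.isdigit] at hd
        · simp [hd, hc]
          exact pvLoopA_true e (i + 1)
      · by_cases hc : c = '.'
        · subst hc; simp [show PySem.Chars.isdigit '.' = false from by decide]
        · simp [hd, hc]
  · rfl
termination_by ((e.length : Int) - i).toNat
decreasing_by all_goals omega

theorem pvLoopA_false (e : List Char) (i : Int) :
    pvLoopA e i false =
      (let d := pvScanDigits e i
       if d < (e.length : Int) ∧ PySem.List.pyGet? e d = some '.' then
         pvScanDigits e (d + 1)
       else d) := by
  rw [pvLoopA, pvScanDigits]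
  split
  · rcases hg : PySem.List.pyGet? e i with _ | c
    · simp [hg]
    · by_cases hd : PySem.Chars.isdigit c = true
      · by_cases hc : c = '.'
        · subst hc; simp [PySem.Chars.isdigit] at hd
        · simp only [hd, hc, Bool.true_or, if_pos]
          exact pvLoopA_false e (i + 1)
      · by_cases hc : c = '.'
        · subst hc
          simp only [hd, Bool.false_or, decide_true, if_true]
          simp [pvLoopA_true, *]
        · simp [hd, hc, hg]
  · rename_i h
    simp [h]
termination_by ((e.length : Int) - i).toNat
decreasing_by all_goals omega

-- ===== VERDICT (by name: the statement is the Claim_ definition above) =====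
theorem scan_number_literal_spec : Claim_equal_scan_number_literal := by
  intro expression start _ _
  unfold Spec_scan_number_literal scan_number_literal scan_number_literal_alt
  exact pvLoopA_false expression.toList (start + 1)
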